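-- pv_equiv track=rewrite | github.com/veerendra-poosala/ccbpCodes | ccbp_codes/Idp_preparation_series_1/BulbStatesPattern.py | get_visits_summary_list
-- ===== SOURCE A (Python) =====
-- def get_visits_summary_list(n):
--     visits_summary_list = []
--     for i in range(1,n+1):
--         visit = list(range(1,n+1))
--         light_status_list = []
--         if i % 2 ==1:
--             for num in visit:
--                 if num % 2 == 0:
--                     light_status_list.append(0)
--                 elif num %2 ==1:
--                     light_status_list.append(1)
--         elif i % 2 == 0:
--             for num in visit:
--                 if num % 2 == 0:
--                     light_status_list.append(1)
--                 elif num %2 ==1: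
--                     light_status_list.append(0)
--         visits_summary_list.append(light_status_list)
--     return visits_summary_list
-- ===== SOURCE B (Python) =====
-- def get_visits_summary_list(n):
--     row_odd = [num % 2 for num in range(1, n + 1)]
--     row_even = [1 - x for x in row_odd]
--     return [list(row_odd) if i % 2 == 1 else list(row_even) for i in range(1, n + 1)]
-- ===== Notes on version B (the rewrite author's own statement) =====
-- stated objective: simpler
-- what changed: Computes the two alternating template rows once (row parity as num % 2 arithmetic instead of per-cell branching) and builds the matrix as a comprehension selecting a copy of the right template per row, replacing A's two-level branch with nested append loops.
import Mathlib
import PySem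

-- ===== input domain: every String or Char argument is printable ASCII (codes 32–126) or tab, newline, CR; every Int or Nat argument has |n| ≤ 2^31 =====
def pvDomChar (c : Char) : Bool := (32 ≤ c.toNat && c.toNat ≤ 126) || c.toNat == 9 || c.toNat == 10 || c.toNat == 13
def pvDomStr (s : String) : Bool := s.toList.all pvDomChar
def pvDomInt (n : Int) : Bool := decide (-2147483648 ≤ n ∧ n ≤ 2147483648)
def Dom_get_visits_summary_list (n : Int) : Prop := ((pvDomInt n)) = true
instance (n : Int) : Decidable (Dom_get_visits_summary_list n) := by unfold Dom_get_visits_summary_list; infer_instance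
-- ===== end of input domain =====

-- B computes the two alternating template rows once and selects a copy per row; simpler decomposition, same O(n^2) cost.

-- ===== PORT A =====
def get_visits_summary_list (n : Int) : List (List Int) :=
  (PySem.List.pyRange 1 (n + 1) 1).foldl (fun acc i =>
    let visit := PySem.List.pyRange 1 (n + 1) 1
    let row : List Int :=
      if PySem.Int.mod i 2 == 1 then
        visit.foldl (fun r num =>
          if PySem.Int.mod num 2 == 0 then r ++ [0]
          else if PySem.Int.mod num 2 == 1 then r ++ [1]
          else r) []
      else if PySem.Int.mod i 2 == 0 then
        visit.foldl (fun r num =>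
          if PySem.Int.mod num 2 == 0 then r ++ [1]
          else if PySem.Int.mod num 2 == 1 then r ++ [0]
          else r) []
      else []
    acc ++ [row]) []

-- ===== PORT B =====
def get_visits_summary_list_alt (n : Int) : List (List Int) :=
  let row_odd := (PySem.List.pyRange 1 (n + 1) 1).map (fun num => PySem.Int.mod num 2)
  let row_even := row_odd.map (fun x => 1 - x)
  (PySem.List.pyRange 1 (n + 1) 1).map (fun i =>
    if PySem.Int.mod i 2 == 1 then row_odd else row_even)

-- ===== PRECONDITION & SPEC =====
def Spec_get_visits_summary_list (n : Int) (out : List (List Int)) : Prop := out = get_visits_summary_list_alt n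
instance (n : Int) (out : List (List Int)) : Decidable (Spec_get_visits_summary_list n out) := by unfold Spec_get_visits_summary_list; infer_instance

-- ===== CLAIM (what is proved, stated in full; the proofs are below) =====
def Claim_equal_get_visits_summary_list : Prop := ∀ (n : Int), Dom_get_visits_summary_list n → Spec_get_visits_summary_list n (get_visits_summary_list n)

-- ===== LEMMAS AND PROOFS =====

-- A's odd-row inner loop body always appends num % 2 (Python's % on a positive divisor is in {0,1})
theorem rowA_odd_body (r : List Int) (num : Int) :
    (if PySem.Int.mod num 2 == 0 then r ++ [0]
     else if PySem.Int.mod num 2 == 1 then r ++ [1] else r)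
      = r ++ [PySem.Int.mod num 2] := by
  rcases PySem.Int.mod_two_eq num with h | h <;> simp only [h] <;> simp

-- A's even-row inner loop body always appends 1 - num % 2
theorem rowA_even_body (r : List Int) (num : Int) :
    (if PySem.Int.mod num 2 == 0 then r ++ [1]
     else if PySem.Int.mod num 2 == 1 then r ++ [0] else r)
      = r ++ [1 - PySem.Int.mod num 2] := by
  rcases PySem.Int.mod_two_eq num with h | h <;> simp only [h] <;> simp

-- ===== VERDICT (by name: the statement is the Claim_ definition above) =====
theorem get_visits_summary_list_spec : Claim_equal_get_visits_summary_list := by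
  intro n _
  show get_visits_summary_list n = get_visits_summary_list_alt n
  unfold get_visits_summary_list get_visits_summary_list_alt
  have e1 : (fun (r : List Int) (num : Int) =>
      if PySem.Int.mod num 2 == 0 then r ++ [(0:Int)]
      else if PySem.Int.mod num 2 == 1 then r ++ [1] else r)
      = (fun r num => r ++ [PySem.Int.mod num 2]) :=
    funext fun r => funext fun num => rowA_odd_body r num
  have e2 : (fun (r : List Int) (num : Int) =>
      if PySem.Int.mod num 2 == 0 then r ++ [(1:Int)]
      else if PySem.Int.mod num 2 == 1 then r ++ [0] else r)
      = (fun r num => r ++ [1 - PySem.Int.mod num 2]) :=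
    funext fun r => funext fun num => rowA_even_body r num
  simp only [e1, e2, PySem.List.foldl_append_singleton_eq_map, List.nil_append, List.map_map]
  refine List.map_congr_left (fun i _ => ?_)
  rcases PySem.Int.mod_two_eq i with h | h <;> simp only [h] <;> norm_num
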